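-- pv_equiv track=rewrite | github.com/OfficialAnujMore/DSA_Coding_Questions | Python/Companies Coding/Unknown Companies/maxtimes.py | maxTime
-- ===== SOURCE A (Python) =====
-- def maxTime(a):
--     dict = {}
--
--     for i in a:
--         keys = dict.keys()
--         if i in keys:
--             dict[i] += 1
--         else:
--             dict[i] = 1
--     max = 1
--     str = ''
--     for i in dict:
--         if dict[i] > max:
--             str += i
--
--     return str
-- ===== SOURCE B (Python) =====
-- def maxTime(a):
--     res = ''
--     rest = list(a)
--     while rest:
--         head, rest = rest[0], rest[1:]
--         if head in rest:
--             res += head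
--         rest = [x for x in rest if x != head]
--     return res
-- ===== Notes on version B (the rewrite author's own statement) =====
-- stated objective: alternative
-- what changed: Replaces A's two-pass count-dictionary (build a counter, then walk its keys) with a head-peeling loop: repeatedly take the first remaining element, append it to the result if it still occurs in the rest, then erase all its occurrences before continuing; no counter, seen-set or dictionary is ever built.
import Mathlib
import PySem

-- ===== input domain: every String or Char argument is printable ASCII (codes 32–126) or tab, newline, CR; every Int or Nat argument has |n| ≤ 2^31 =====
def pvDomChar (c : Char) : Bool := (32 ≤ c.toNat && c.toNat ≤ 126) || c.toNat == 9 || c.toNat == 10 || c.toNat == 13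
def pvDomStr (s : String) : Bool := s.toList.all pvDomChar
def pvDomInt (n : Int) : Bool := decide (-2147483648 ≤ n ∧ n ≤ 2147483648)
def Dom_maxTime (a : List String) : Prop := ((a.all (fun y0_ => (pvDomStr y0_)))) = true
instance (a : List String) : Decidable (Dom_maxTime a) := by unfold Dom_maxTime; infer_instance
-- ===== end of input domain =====

-- B replaces A's count-dictionary with a head-peeling loop (append the head if it recurs, erase all its occurrences, continue); alternative algorithm, not faster (quadratic).

-- ===== PORT A =====
-- counting loop: 'keys = dict.keys(); if i in keys: dict[i] += 1 else: dict[i] = 1'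
-- (dict[i] read in the += branch is total there since i is a key; ported as getD 0)
def maxTime (a : List String) : String :=
  let d := a.foldl
    (fun d i =>
      if d.keys.contains i then d.insert i (d.getD i 0 + 1) else d.insert i 1)
    PySem.Dict.empty
  let mx : Int := 1
  d.keys.foldl (fun s i => if d.getD i 0 > mx then s ++ i else s) ""

-- ===== PORT B =====
-- the while loop: peel the head, append it to res if duplicated, erase its occurrences
def pvGo : List String → String → String
  | [], res => res
  | x :: t, res =>
      pvGo (t.filter (fun y => y != x)) (res ++ if t.contains x then x else "")
termination_by a _ => a.length
decreasing_by simpa using Nat.lt_succ_of_le (List.length_filter_le _ t)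

def maxTime_alt (a : List String) : String := pvGo a ""

-- ===== PRECONDITION & SPEC =====
def Spec_maxTime (a : List String) (out : String) : Prop := out = maxTime_alt a
instance (a : List String) (out : String) : Decidable (Spec_maxTime a out) := by unfold Spec_maxTime; infer_instance

-- ===== CLAIM =====
def Claim_equal_maxTime : Prop := ∀ (a : List String), Dom_maxTime a → Spec_maxTime a (maxTime a)

-- ===== LEMMAS AND PROOFS =====

-- first occurrences of l, via head-peeling (B's traversal order)
def pvFirsts : List String → List String
  | [] => []
  | x :: t => x :: pvFirsts (t.filter (fun y => y != x))
termination_by a => a.length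
decreasing_by simpa using Nat.lt_succ_of_le (List.length_filter_le _ t)

-- the elements of l at their first occurrence, excluding those already in s (A's traversal order)
def pvNewKeys (s : PySem.Set String) : List String → List String
  | [] => []
  | x :: t => if s.contains x then pvNewKeys s t else x :: pvNewKeys (PySem.Set.add s x) t

lemma pvFoldlAdd_eq (l : List String) : ∀ (s : PySem.Set String),
    l.foldl PySem.Set.add s = s ++ pvNewKeys s l := by
  induction l with
  | nil => intro s; simp [pvNewKeys]
  | cons x t ih =>
    intro s
    by_cases hc : s.contains x = true
    · simp only [List.foldl_cons, PySem.Set.add, pvNewKeys, hc, if_true, ih]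
    · simp only [List.foldl_cons, PySem.Set.add, pvNewKeys, hc, if_false,
        Bool.false_eq_true]
      rw [ih]
      simp

-- A's seen-order first occurrences coincide with B's head-peeling first occurrences
lemma pvNewKeys_eq_firsts : ∀ (n : Nat) (l : List String), l.length ≤ n →
    ∀ (s : PySem.Set String),
    pvNewKeys s l = pvFirsts (l.filter (fun y => !s.contains y)) := by
  intro n
  induction n with
  | zero =>
    intro l hl s
    have : l = [] := List.eq_nil_of_length_eq_zero (Nat.le_zero.1 hl)
    subst this
    simp [pvNewKeys, pvFirsts]
  | succ n ih =>
    intro l hl s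
    cases l with
    | nil => simp [pvNewKeys, pvFirsts]
    | cons x t =>
      have ht : t.length ≤ n := by simpa using hl
      by_cases hc : s.contains x = true
      · rw [pvNewKeys]
        rw [if_pos hc, ih t ht s, List.filter_cons]
        rw [show (!s.contains x) = false by simpa using hc]
        simp
      · have hc' : s.contains x = false := by simpa using hc
        rw [pvNewKeys, if_neg hc, List.filter_cons]
        rw [show (!s.contains x) = true by simpa using hc']
        rw [if_pos rfl, pvFirsts, ih t ht (PySem.Set.add s x)]
        refine congrArg (fun l => x :: pvFirsts l) ?_
        rw [List.filter_filter]
        apply List.filter_congr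
        intro y _
        have hx : x ∉ s := by simpa using hc
        by_cases hyx : y = x <;> simp [PySem.Set.add, hx, hyx, List.mem_append]

lemma pvMem_firsts {y : String} : ∀ (n : Nat) (l : List String), l.length ≤ n →
    y ∈ pvFirsts l → y ∈ l := by
  intro n
  induction n with
  | zero =>
    intro l hl
    have : l = [] := List.eq_nil_of_length_eq_zero (Nat.le_zero.1 hl)
    subst this
    simp [pvFirsts]
  | succ n ih =>
    intro l hl
    cases l with
    | nil => simp [pvFirsts]
    | cons x t =>
      have ht : (t.filter (fun y => y != x)).length ≤ n := by
        have := List.length_filter_le (fun y => y != x) t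
        have hl' : t.length ≤ n := by simpa using hl
        omega
      rw [pvFirsts]
      intro h
      rcases List.mem_cons.1 h with rfl | h
      · exact List.mem_cons.2 (Or.inl rfl)
      · exact List.mem_cons.2 (Or.inr (List.mem_of_mem_filter (ih _ ht h)))

-- B's loop computes the conditional-append fold over its own first-occurrence list
lemma pvGo_eq_fold : ∀ (n : Nat) (a : List String), a.length ≤ n → ∀ (res : String),
    pvGo a res
      = (pvFirsts a).foldl (fun r k => if 1 < a.count k then r ++ k else r) res := by
  intro n
  induction n with
  | zero =>
    intro a ha res
    have : a = [] := List.eq_nil_of_length_eq_zero (Nat.le_zero.1 ha)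
    subst this
    simp [pvGo, pvFirsts]
  | succ n ih =>
    intro a ha res
    cases a with
    | nil => simp [pvGo, pvFirsts]
    | cons x t =>
      have htn : (t.filter (fun y => y != x)).length ≤ n := by
        have := List.length_filter_le (fun y => y != x) t
        have hl' : t.length ≤ n := by simpa using ha
        omega
      rw [pvGo, pvFirsts]
      simp only [List.foldl_cons]
      have hhead : (res ++ if t.contains x then x else "")
          = (if 1 < (x :: t).count x then res ++ x else res) := by
        rw [List.count_cons_self]
        by_cases hm : x ∈ t
        · rw [if_pos (by simpa using hm),
            if_pos (by have := List.count_pos_iff.2 hm; omega)]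
        · have h0 : t.count x = 0 := List.count_eq_zero.2 hm
          rw [if_neg (by simpa using hm), if_neg (by omega)]
          simp
      have hcong : (pvFirsts (t.filter (fun y => y != x))).foldl
          (fun r k => if 1 < (x :: t).count k then r ++ k else r)
            (if 1 < (x :: t).count x then res ++ x else res)
          = (pvFirsts (t.filter (fun y => y != x))).foldl
          (fun r k => if 1 < (t.filter (fun y => y != x)).count k then r ++ k else r)
            (if 1 < (x :: t).count x then res ++ x else res) := by
        apply PySem.List.foldl_congr_mem
        intro acc k hk
        have hkt : k ∈ t.filter (fun y => y != x) := pvMem_firsts _ _ (Nat.le_refl _) hk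
        have hne : k ≠ x := by
          have := List.of_mem_filter hkt
          simpa using this
        have hcnt : (x :: t).count k = (t.filter (fun y => y != x)).count k := by
          rw [List.count_filter (by simpa using hne)]
          simp [Ne.symm hne]
        rw [hcnt]
      rw [hhead, hcong, ih _ htn]

theorem maxTime_spec : Claim_equal_maxTime := by
  unfold Claim_equal_maxTime
  intro a _
  unfold Spec_maxTime maxTime
  -- A's counting loop is the counter loop
  have hd : a.foldl
      (fun d i =>
        if d.keys.contains i then d.insert i (d.getD i 0 + 1) else d.insert i 1)
      PySem.Dict.empty = PySem.Dict.counter a := by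
    rw [PySem.List.foldl_congr_mem _ _
      (fun d i => d.insert i (d.getD i 0 + 1)) _ ?_]
    · exact PySem.Dict.foldl_insert_getD_add_one_eq_counter a
    · intro d x _
      by_cases h : x ∈ d.keys
      · simp [h]
      · have hc : d.contains x = false := by
          rw [Bool.eq_false_iff]
          intro hcc
          exact h ((PySem.Dict.contains_iff_mem_keys (d := d) (k := x)).1 hcc)
        simp [h, PySem.Dict.getD_of_not_contains _ _ hc]
  simp only [hd]
  rw [PySem.Dict.keys_counter]
  have hof : PySem.Set.ofList a = pvFirsts a := by
    have h1 := pvFoldlAdd_eq a PySem.Set.empty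
    have h2 := pvNewKeys_eq_firsts a.length a (Nat.le_refl _) PySem.Set.empty
    simp only [PySem.Set.empty] at h1 h2
    rw [PySem.Set.ofList_eq_foldl, h1, h2]
    simp
  unfold maxTime_alt
  rw [hof, pvGo_eq_fold a.length a (Nat.le_refl _)]
  apply PySem.List.foldl_congr_mem
  intro acc x _
  rw [PySem.Dict.getD_counter]
  by_cases h : 1 < a.count x
  · rw [if_pos (by exact_mod_cast h), if_pos h]
  · rw [if_neg (by exact_mod_cast h), if_neg h]
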